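-- pv_equiv track=rewrite | github.com/irene-2005/Words_2_Frame_CineHack.AI | app/ai_integration.py | _score_pdf_text
-- ===== SOURCE A (Python) =====
-- def _score_pdf_text(text: str) -> int:
--     upper = text.upper()
--     letters = sum(1 for ch in text if ch.isalpha())
--     spaces = text.count(" ")
--     newlines = text.count("\n")
--     headings = sum(1 for marker in ("INT", "EXT", "SCENE", "FADE") if marker in upper)
--     penalties = text.count("\ufffd") * 10
--     return letters + spaces * 2 + newlines * 3 + headings * 50 - penalties
-- ===== SOURCE B (Python) =====
-- def _score_pdf_text(text: str) -> int:
--     # Single fused pass: each character contributes its full weighted score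
--     # directly (1 letter, 2 space, 3 newline, -10 replacement char), instead
--     # of staged per-feature counting passes; headings checked separately.
--     def weight(ch):
--         if ch.isalpha():
--             return 1
--         if ch == " ":
--             return 2
--         if ch == "\n":
--             return 3
--         if ch == "\ufffd":
--             return -10
--         return 0
--
--     score = sum(map(weight, text))
--     upper = text.upper()
--     score += 50 * sum(marker in upper for marker in ("INT", "EXT", "SCENE", "FADE"))
--     return score
-- ===== Notes on version B (the rewrite author's own statement) =====
-- stated objective: alternative
-- what changed: B replaces A's staged per-feature passes (a letter scan plus three str.count passes combined at the end) by one fused pass that maps each character to its full weighted contribution (1/2/3/-10) and sums, keeping only the heading substring check separate.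
import Mathlib
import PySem

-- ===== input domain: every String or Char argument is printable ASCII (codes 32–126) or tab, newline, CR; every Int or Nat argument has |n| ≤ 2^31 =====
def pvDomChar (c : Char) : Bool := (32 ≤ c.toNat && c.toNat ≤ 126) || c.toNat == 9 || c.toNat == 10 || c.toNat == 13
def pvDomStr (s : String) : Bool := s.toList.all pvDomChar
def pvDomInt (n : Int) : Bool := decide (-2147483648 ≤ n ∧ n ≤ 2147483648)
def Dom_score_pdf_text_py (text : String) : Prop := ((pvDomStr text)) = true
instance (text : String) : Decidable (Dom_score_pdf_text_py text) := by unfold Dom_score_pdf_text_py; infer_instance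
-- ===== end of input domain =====

-- B fuses A's staged per-feature passes into one weighted pass over the characters
-- (alternative decomposition, same values).

-- ===== PORT A =====
def score_pdf_text_py (text : String) : Int :=
  let upper := PySem.Str.upper text
  let letters : Int :=
    text.toList.foldl (fun acc ch => if PySem.Chars.isalpha ch then acc + 1 else acc) 0
  let spaces : Int := (PySem.Str.count text " " : Int)
  let newlines : Int := (PySem.Str.count text "\n" : Int)
  let headings : Int :=
    ["INT", "EXT", "SCENE", "FADE"].foldl
      (fun acc marker => if PySem.Str.isIn marker upper then acc + 1 else acc) 0
  let penalties : Int := (PySem.Str.count text "\uFFFD" : Int) * 10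
  letters + spaces * 2 + newlines * 3 + headings * 50 - penalties

-- ===== PORT B =====
def pvWeight (ch : Char) : Int :=
  if PySem.Chars.isalpha ch then 1
  else if ch = ' ' then 2
  else if ch = '\n' then 3
  else if ch = '\uFFFD' then -10
  else 0

def score_pdf_text_py_alt (text : String) : Int :=
  let score : Int := (text.toList.map pvWeight).foldl (· + ·) 0
  let upper := PySem.Str.upper text
  let headings : Int :=
    ["INT", "EXT", "SCENE", "FADE"].foldl
      (fun acc marker => acc + (if PySem.Str.isIn marker upper then 1 else 0)) 0
  score + 50 * headings

-- ===== PRECONDITION & SPEC =====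
def Spec_score_pdf_text_py (text : String) (out : Int) : Prop := out = score_pdf_text_py_alt text
instance (text : String) (out : Int) : Decidable (Spec_score_pdf_text_py text out) := by unfold Spec_score_pdf_text_py; infer_instance

-- ===== CLAIM =====
def Claim_equal_score_pdf_text_py : Prop := ∀ (text : String), Dom_score_pdf_text_py text → Spec_score_pdf_text_py text (score_pdf_text_py text)

-- ===== LEMMAS AND PROOFS =====

-- s.count(sub) for a single-character sub is the per-character count.
theorem pv_count_go_singleton (c : Char) :
    ∀ (fuel : Nat) (s : List Char) (acc : Nat), s.length ≤ fuel →
      PySem.Chars.count.go [c] fuel s acc = acc + s.count c := by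
  intro fuel
  induction fuel with
  | zero =>
    intro s acc h
    have hs : s = [] := List.eq_nil_of_length_eq_zero (Nat.le_zero.mp h)
    subst hs
    simp [PySem.Chars.count.go.eq_def]
  | succ n ih =>
    intro s acc h
    cases s with
    | nil => simp [PySem.Chars.count.go.eq_def]
    | cons hd t =>
      rw [PySem.Chars.count.go.eq_def]
      have hlen : t.length ≤ n := by simpa using h
      by_cases hc : c = hd
      · subst hc
        simp [List.isPrefixOf, ih _ _ hlen]
        omega
      · simp [List.isPrefixOf, hc, ih _ _ hlen, Ne.symm hc]

theorem pv_count_singleton (s : List Char) (c : Char) :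
    PySem.Chars.count s [c] = s.count c := by
  simpa [PySem.Chars.count] using pv_count_go_singleton c s.length s 0 le_rfl

theorem pv_count_str (text s : String) (c : Char) (h : s.toList = [c]) :
    PySem.Str.count text s = text.toList.count c := by
  rw [PySem.Str.count_eq, h, pv_count_singleton]

-- the per-character weight written as the sum of the feature indicators
theorem pv_weight_char (hd : Char) :
    pvWeight hd = (if PySem.Chars.isalpha hd then (1 : Int) else 0)
      + (if hd == ' ' then (1 : Int) else 0) * 2
      + (if hd == '\n' then (1 : Int) else 0) * 3
      - (if hd == '\uFFFD' then (1 : Int) else 0) * 10 := by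
  simp only [beq_iff_eq]
  unfold pvWeight
  by_cases h1 : PySem.Chars.isalpha hd
  · have h2 : hd ≠ ' ' := by rintro rfl; revert h1; decide
    have h3 : hd ≠ '\n' := by rintro rfl; revert h1; decide
    have h4 : hd ≠ '\uFFFD' := by rintro rfl; revert h1; decide
    simp [h1, h2, h3, h4]
  · by_cases h2 : hd = ' '
    · subst h2
      simp [h1]
    · by_cases h3 : hd = '\n'
      · subst h3
        simp [h1, h2]
      · by_cases h4 : hd = '\uFFFD'
        · subst h4
          simp [h1, h2, h3]
        · simp [h1, h2, h3, h4]

-- the fused weighted pass equals the staged feature counts combined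
theorem pv_weight_sum (l : List Char) :
    (l.map pvWeight).foldl (· + ·) 0 =
      (l.countP PySem.Chars.isalpha : Int) + (l.count ' ' : Nat) * 2
        + (l.count '\n' : Nat) * 3 - (l.count '\uFFFD' : Nat) * 10 := by
  induction l with
  | nil => simp
  | cons hd t ih =>
    have hfold : ∀ (a : Int) (xs : List Int), xs.foldl (· + ·) a = a + xs.foldl (· + ·) 0 := by
      intro a xs
      induction xs generalizing a with
      | nil => simp
      | cons x xs ih2 => simp [List.foldl_cons, ih2 (a + x), ih2 x]; ring
    rw [List.map_cons, List.foldl_cons]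
    conv_lhs => rw [hfold]
    rw [ih]
    simp only [List.countP_cons, List.count_cons, pv_weight_char, Nat.cast_add, Nat.cast_ite,
      Nat.cast_one, Nat.cast_zero]
    ring

-- B's heading fold is the same fold as A's
theorem pv_headings_eq (u : String) :
    (["INT", "EXT", "SCENE", "FADE"].foldl
        (fun acc marker => acc + (if PySem.Str.isIn marker u then 1 else 0)) (0 : Int))
      = ["INT", "EXT", "SCENE", "FADE"].foldl
          (fun acc marker => if PySem.Str.isIn marker u then acc + 1 else acc) (0 : Int) := by
  have h : (fun (acc : Int) (marker : String) => acc + (if PySem.Str.isIn marker u then 1 else 0))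
      = fun acc marker => if PySem.Str.isIn marker u then acc + 1 else acc := by
    funext acc marker; split <;> simp
  rw [h]

-- ===== VERDICT =====
theorem score_pdf_text_py_spec : Claim_equal_score_pdf_text_py := by
  intro text _
  unfold Spec_score_pdf_text_py score_pdf_text_py score_pdf_text_py_alt
  simp only [pv_weight_sum, pv_headings_eq, PySem.List.foldl_if_add_one,
    pv_count_str text " " ' ' rfl, pv_count_str text "\n" '\n' rfl,
    pv_count_str text "\uFFFD" '\uFFFD' rfl]
  ring
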